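-- pv_equiv track=rewrite | github.com/miliar/Code_Jam_Webscraper | solutions_python/solutions_year16_round2_nr1/1167.py | take_one
-- ===== SOURCE A (Python) =====
-- DIGITS = ("ZERO", "ONE", "TWO", "THREE", "FOUR", "FIVE", "SIX", "SEVEN",
--           "EIGHT", "NINE")
--
-- def take_one(digit, letters):
--     result = []
--     t = list(letters)
--     for c in DIGITS[digit]:
--         if c not in t:
--             return (None, letters)
--         t.remove(c)
--     return (digit, tuple(t))
-- ===== SOURCE B (Python) =====
-- DIGITS = ("ZERO", "ONE", "TWO", "THREE", "FOUR", "FIVE", "SIX", "SEVEN",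
--           "EIGHT", "NINE")
--
-- def take_one(digit, letters):
--     need = {}
--     for c in DIGITS[digit]:
--         need[c] = need.get(c, 0) + 1
--     have = {}
--     for x in letters:
--         have[x] = have.get(x, 0) + 1
--     for c, n in need.items():
--         if n > have.get(c, 0):
--             return (None, letters)
--     result = []
--     for x in letters:
--         if need.get(x, 0) > 0:
--             need[x] = need[x] - 1
--         else:
--             result.append(x)
--     return (digit, tuple(result))
-- ===== Notes on version B (the rewrite author's own statement) =====
-- stated objective: faster
-- what changed: Replaces the per-character membership test plus list.remove (rescans of the letter list for every character of the digit word) by two count dictionaries built once, a single feasibility check over the word's counts, and one filtering pass over letters that skips the first need[c] occurrences of each character.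
import Mathlib
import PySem

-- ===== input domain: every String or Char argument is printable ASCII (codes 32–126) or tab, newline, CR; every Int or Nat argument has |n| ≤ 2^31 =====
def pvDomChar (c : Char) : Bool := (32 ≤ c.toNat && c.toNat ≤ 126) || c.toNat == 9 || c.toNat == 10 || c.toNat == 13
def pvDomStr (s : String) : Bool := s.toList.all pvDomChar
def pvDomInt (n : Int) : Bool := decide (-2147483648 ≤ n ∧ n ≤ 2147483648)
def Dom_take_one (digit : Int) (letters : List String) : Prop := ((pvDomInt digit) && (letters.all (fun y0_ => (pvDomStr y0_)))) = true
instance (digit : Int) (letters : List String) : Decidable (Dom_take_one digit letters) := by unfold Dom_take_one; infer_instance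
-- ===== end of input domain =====

-- B replaces A's repeated membership test + list.remove scans by two count dictionaries built once and a single filtering pass over the letters (objective: faster).


-- ===== PORT A =====
def DIGITS : List String := ["ZERO", "ONE", "TWO", "THREE", "FOUR", "FIVE", "SIX", "SEVEN", "EIGHT", "NINE"]

-- A's loop: 'for c in DIGITS[digit]: if c not in t: return (None, letters); t.remove(c)'.
-- remove? is none exactly when c is not in t, i.e. exactly A's 'c not in t' early return.
def takeLoopA : List Char → List String → Option (List String)
  | [], t => some t
  | c :: cs, t =>
    match PySem.List.remove? t (String.ofList [c]) with
    | none => none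
    | some t' => takeLoopA cs t'

def takeA (digit : Int) (letters : List String) (w : String) : Option Int × List String :=
  match takeLoopA w.toList letters with
  | none => (none, letters)
  | some t => (some digit, t)

def take_one (digit : Int) (letters : List String) : Option Int × List String :=
  match PySem.List.pyGet? DIGITS digit with
  | none => (none, letters)   -- DIGITS[digit] raises IndexError here; excluded by Pre_take_one
  | some w => takeA digit letters w

-- ===== PORT B =====
-- B: need/have count dicts, one feasibility check over need.items, one filtering pass over letters.
def takeB (digit : Int) (letters : List String) (w : String) : Option Int × List String :=
  let need : PySem.Dict String Int :=
    w.toList.foldl (fun d c => d.insert (String.ofList [c]) (d.getD (String.ofList [c]) 0 + 1)) PySem.Dict.empty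
  let haveD : PySem.Dict String Int :=
    letters.foldl (fun d x => d.insert x (d.getD x 0 + 1)) PySem.Dict.empty
  if need.items.any (fun p => decide (p.2 > haveD.getD p.1 0)) then
    (none, letters)
  else
    let st := letters.foldl
      (fun (s : PySem.Dict String Int × List String) x =>
        if s.1.getD x 0 > 0 then (s.1.insert x (s.1.getD x 0 - 1), s.2)
        else (s.1, s.2 ++ [x]))
      (need, ([] : List String))
    (some digit, st.2)

def take_one_alt (digit : Int) (letters : List String) : Option Int × List String :=
  match PySem.List.pyGet? DIGITS digit with
  | none => (none, letters)   -- same IndexError; excluded by Pre_take_one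
  | some w => takeB digit letters w

-- ===== PRECONDITION & SPEC =====
-- Pre_ excludes exactly the digits outside -10..9, on which Python's DIGITS[digit] raises IndexError
-- (both A and B raise there; Python tuple indices wrap for -10 ≤ digit < 0).
def Pre_take_one (digit : Int) (letters : List String) : Prop := -10 ≤ digit ∧ digit < 10
instance (digit : Int) (letters : List String) : Decidable (Pre_take_one digit letters) := by unfold Pre_take_one; infer_instance
def pvWitness_take_one : Int × List String := (3, ["T", "E", "R", "H", "E", "X"])

def Spec_take_one (digit : Int) (letters : List String) (out : Option Int × List String) : Prop := out = take_one_alt digit letters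
instance (digit : Int) (letters : List String) (out : Option Int × List String) : Decidable (Spec_take_one digit letters out) := by unfold Spec_take_one; infer_instance

-- ===== CLAIM (what is proved, stated in full; the proofs are below) =====
def Claim_equal_take_one : Prop := ∀ (digit : Int) (letters : List String), Dom_take_one digit letters → Pre_take_one digit letters → Spec_take_one digit letters (take_one digit letters)

-- ===== LEMMAS AND PROOFS =====

-- A's loop, re-indexed over the word's characters as one-character strings.
def takeLoopW : List String → List String → Option (List String)
  | [], t => some t
  | s :: ws, t =>
    match PySem.List.remove? t s with
    | none => none
    | some t' => takeLoopW ws t'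

lemma takeLoopA_eq_W : ∀ (cs : List Char) (t : List String),
    takeLoopA cs t = takeLoopW (cs.map (fun c => String.ofList [c])) t
  | [], _ => rfl
  | c :: cs, t => by
    simp only [takeLoopA, List.map_cons, takeLoopW]
    cases PySem.List.remove? t (String.ofList [c]) with
    | none => rfl
    | some t' => exact takeLoopA_eq_W cs t'

-- Proof-side model of B's filtering pass: skip the first (f x) occurrences of each x.
def skipF (f : String → Int) : List String → List String
  | [] => []
  | x :: xs => if f x > 0 then skipF (fun y => if y = x then f y - 1 else f y) xs else x :: skipF f xs

lemma skipF_of_nonpos (f : String → Int) (h : ∀ y, f y ≤ 0) : ∀ t, skipF f t = t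
  | [] => rfl
  | x :: xs => by
    simp only [skipF]
    rw [if_neg (by have := h x; omega), skipF_of_nonpos f h xs]

lemma skipF_erase : ∀ (t : List String) (f : String → Int) (s : String), s ∈ t → 0 < f s →
    skipF f t = skipF (fun y => if y = s then f y - 1 else f y) (t.erase s)
  | [], _, s, hs, _ => by simp at hs
  | x :: xs, f, s, hs, hf => by
    by_cases hx : x = s
    · subst hx
      rw [List.erase_cons_head]
      simp only [skipF]
      rw [if_pos hf]
    · have hsx : s ∈ xs := by
        rcases List.mem_cons.1 hs with h | h
        · exact absurd h.symm hx
        · exact h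
      have hxs' : ¬ s = x := fun hh => hx hh.symm
      rw [List.erase_cons_tail (by simp [hx])]
      simp only [skipF]
      by_cases hfx : f x > 0
      · rw [if_pos hfx, if_pos (show (if x = s then f x - 1 else f x) > 0 by rw [if_neg hx]; exact hfx),
            skipF_erase xs (fun y => if y = x then f y - 1 else f y) s hsx (by simpa [hxs'] using hf)]
        congr 1
        funext y
        by_cases h1 : y = s <;> by_cases h2 : y = x <;> simp [h1, h2, hxs', hx]
      · rw [if_neg hfx, if_neg (show ¬ (if x = s then f x - 1 else f x) > 0 by rw [if_neg hx]; exact hfx),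
            skipF_erase xs f s hsx hf]

lemma takeLoopW_none : ∀ (ws t : List String), (∃ k, t.count k < ws.count k) → takeLoopW ws t = none
  | [], _, ⟨k, hk⟩ => by simp at hk
  | s :: ws, t, ⟨k, hk⟩ => by
    by_cases hs : s ∈ t
    · simp only [takeLoopW, PySem.List.remove?_eq_some_erase t s hs]
      refine takeLoopW_none ws (t.erase s) ⟨k, ?_⟩
      have hst : 0 < t.count s := List.count_pos_iff.2 hs
      by_cases hks : k = s
      · subst hks
        rw [List.count_erase_self]
        rw [List.count_cons_self] at hk
        omega
      · rw [List.count_erase_of_ne hks]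
        rw [List.count_cons_of_ne (Ne.symm hks)] at hk
        exact hk
    · simp only [takeLoopW, (PySem.List.remove?_eq_none_iff t s).mpr hs]

lemma takeLoopW_some : ∀ (ws t : List String), (∀ k, ws.count k ≤ t.count k) →
    takeLoopW ws t = some (skipF (fun y => (ws.count y : Int)) t)
  | [], t, _ => by
    rw [skipF_of_nonpos (fun y => ((([] : List String).count y : Nat) : Int)) (fun y => by simp) t]
    rfl
  | s :: ws, t, h => by
    have hst : 0 < t.count s := by
      have := h s; rw [List.count_cons_self] at this; omega
    have hs : s ∈ t := List.count_pos_iff.1 hst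
    simp only [takeLoopW, PySem.List.remove?_eq_some_erase t s hs]
    have h' : ∀ k, ws.count k ≤ (t.erase s).count k := by
      intro k
      by_cases hks : k = s
      · subst hks
        rw [List.count_erase_self]
        have := h k; rw [List.count_cons_self] at this; omega
      · rw [List.count_erase_of_ne hks]
        have := h k; rw [List.count_cons_of_ne (Ne.symm hks)] at this; exact this
    rw [takeLoopW_some ws (t.erase s) h']
    have hpos : (0 : Int) < (((s :: ws).count s : Nat) : Int) := by
      rw [List.count_cons_self]; exact_mod_cast Nat.succ_pos (ws.count s)
    rw [skipF_erase t (fun y => (((s :: ws).count y : Nat) : Int)) s hs hpos]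
    have hfun : (fun y => if y = s then (((s :: ws).count y : Nat) : Int) - 1 else (((s :: ws).count y : Nat) : Int))
        = (fun y => ((ws.count y : Nat) : Int)) := by
      funext y
      by_cases hy : y = s
      · subst hy
        rw [if_pos rfl, List.count_cons_self]
        push_cast
        ring
      · rw [if_neg hy, List.count_cons_of_ne (Ne.symm hy)]
    rw [hfun]

lemma foldl_pass : ∀ (l : List String) (d : PySem.Dict String Int) (acc : List String),
    (l.foldl
      (fun (s : PySem.Dict String Int × List String) x =>
        if s.1.getD x 0 > 0 then (s.1.insert x (s.1.getD x 0 - 1), s.2)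
        else (s.1, s.2 ++ [x]))
      (d, acc)).2 = acc ++ skipF (fun y => d.getD y 0) l
  | [], d, acc => by simp [skipF]
  | x :: l, d, acc => by
    simp only [List.foldl_cons, skipF]
    by_cases hx : d.getD x 0 > 0
    · rw [if_pos hx, if_pos hx, foldl_pass l (d.insert x (d.getD x 0 - 1)) acc]
      have hfun : (fun y => (d.insert x (d.getD x 0 - 1)).getD y 0)
          = (fun y => if y = x then d.getD y 0 - 1 else d.getD y 0) := by
        funext y
        rw [PySem.Dict.getD_insert]
        by_cases h : y = x <;> simp [h]
      rw [hfun]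
    · rw [if_neg hx, if_neg hx, foldl_pass l d (acc ++ [x])]
      simp

lemma need_eq (w : String) :
    w.toList.foldl (fun d c => d.insert (String.ofList [c]) (d.getD (String.ofList [c]) 0 + 1)) (PySem.Dict.empty : PySem.Dict String Int)
      = PySem.Dict.counter (w.toList.map (fun c => String.ofList [c])) := by
  have h : w.toList.foldl (fun d c => d.insert (String.ofList [c]) (d.getD (String.ofList [c]) 0 + 1)) (PySem.Dict.empty : PySem.Dict String Int)
      = (w.toList.map (fun c => String.ofList [c])).foldl (fun d x => d.insert x (d.getD x 0 + 1)) PySem.Dict.empty :=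
    (List.foldl_map (f := fun c => String.ofList [c])
      (g := fun (d : PySem.Dict String Int) x => d.insert x (d.getD x 0 + 1))
      (l := w.toList) (init := PySem.Dict.empty)).symm
  rw [h, PySem.Dict.foldl_insert_getD_add_one_eq_counter]

lemma check_iff (ws letters : List String) :
    ((PySem.Dict.counter ws).items.any
      (fun p => decide (p.2 > (PySem.Dict.counter letters).getD p.1 0)) = true)
    ↔ ∃ k, letters.count k < ws.count k := by
  rw [PySem.Dict.items_counter, List.any_map]
  simp only [Function.comp, PySem.Dict.getD_counter, List.any_eq_true, decide_eq_true_eq, gt_iff_lt]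
  constructor
  · rintro ⟨k, _, hlt⟩
    exact ⟨k, by exact_mod_cast hlt⟩
  · rintro ⟨k, hlt⟩
    refine ⟨k, ?_, by exact_mod_cast hlt⟩
    exact (PySem.Set.mem_ofList ws k).mpr (List.count_pos_iff.1 (by omega))

lemma body_eq (digit : Int) (letters : List String) (w : String) :
    takeA digit letters w = takeB digit letters w := by
  simp only [takeA, takeB]
  rw [takeLoopA_eq_W w.toList letters, need_eq w, PySem.Dict.foldl_insert_getD_add_one_eq_counter]
  set ws := w.toList.map (fun c => String.ofList [c]) with hws
  by_cases hbad : ∃ k, letters.count k < ws.count k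
  · rw [takeLoopW_none ws letters hbad, if_pos ((check_iff ws letters).2 hbad)]
  · have hgood : ∀ k, ws.count k ≤ letters.count k := fun k => by
      by_contra hk
      exact hbad ⟨k, by omega⟩
    rw [takeLoopW_some ws letters hgood,
        if_neg (fun h => hbad ((check_iff ws letters).1 h)),
        foldl_pass letters (PySem.Dict.counter ws) []]
    have hf : (fun y => (PySem.Dict.counter ws).getD y 0) = (fun y => ((ws.count y : Nat) : Int)) := by
      funext y
      exact PySem.Dict.getD_counter ws y
    rw [hf]
    simp

lemma main_eq (digit : Int) (letters : List String) :
    take_one digit letters = take_one_alt digit letters := by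
  unfold take_one take_one_alt
  cases hW : PySem.List.pyGet? DIGITS digit with
  | none => rfl
  | some w => exact body_eq digit letters w

-- ===== VERDICT (by name: the statement is the Claim_ definition above) =====
theorem take_one_spec : Claim_equal_take_one := by
  intro digit letters _ _
  exact main_eq digit letters
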